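-- pv_equiv track=rewrite | github.com/tpmmthomas/binance-copy-trade-bot-old | old_mon_position.py | format_username
-- ===== SOURCE A (Python) =====
-- def format_username(x,y):
--     words = []
--     prev_idx =  0
--     for i,ch in enumerate(x):
--         result = y.find(x[prev_idx:i])
--         if result == -1:
--             words.append(x[prev_idx:i-1])
--             prev_idx = i-1
--     words.append(x[prev_idx:])
--     return words[-1]
-- ===== SOURCE B (Python) =====
-- def format_username(x, y):
--     # Incremental matching: keep the list S of start positions in y where the
--     # current window x[p:i] occurs; extend by one char per step instead of
--     # re-running y.find on the whole slice (better worst case, O(n*|y|)).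
--     m = len(y)
--     p = 0
--     S = list(range(m + 1))  # the empty window occurs everywhere in y
--     for i in range(len(x)):
--         if not S:
--             # x[p:i] is not a substring of y: restart the window at i-1
--             p = i - 1
--             S = [j for j in range(m) if y[j] == x[i - 1]]
--         k = i - p
--         c = x[i]
--         S = [j for j in S if j + k < m and y[j + k] == c]
--     return x[p:]
-- ===== Notes on version B (the rewrite author's own statement) =====
-- stated objective: alternative
-- what changed: B replaces A's repeated y.find on a growing slice (and the dead words list) with incremental substring matching: it maintains the list of start positions in y where the current window occurs, filtering it by one character per step, and slices once at the end; better worst-case complexity, but CPython's C-level find makes A faster on typical inputs, so no speed is claimed.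
import Mathlib
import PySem

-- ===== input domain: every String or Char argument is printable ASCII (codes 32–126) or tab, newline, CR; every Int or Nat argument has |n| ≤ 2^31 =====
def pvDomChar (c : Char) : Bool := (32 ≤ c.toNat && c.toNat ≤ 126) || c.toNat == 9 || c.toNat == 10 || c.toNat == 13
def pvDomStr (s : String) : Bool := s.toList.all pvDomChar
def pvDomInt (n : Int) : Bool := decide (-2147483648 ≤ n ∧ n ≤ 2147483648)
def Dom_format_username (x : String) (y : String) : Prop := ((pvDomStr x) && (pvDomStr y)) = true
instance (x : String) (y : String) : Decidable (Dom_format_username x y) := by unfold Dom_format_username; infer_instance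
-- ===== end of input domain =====

-- B replaces A's repeated y.find on a growing slice with incremental occurrence-list matching
-- (filter the start positions of the current window in y by one character per step); objective: alternative.

-- ===== PORT A =====
def format_username (x : String) (y : String) : String :=
  let st :=
    (PySem.List.enumerate x.toList 0).foldl
      (fun (st : List String × Int) (p : Int × Char) =>
        let result := PySem.Str.find y (PySem.Str.slice x (some st.2) (some p.1))
        if result = -1 then
          (st.1 ++ [PySem.Str.slice x (some st.2) (some (p.1 - 1))], p.1 - 1)
        else st)
      ([], 0)
  let words := st.1 ++ [PySem.Str.slice x (some st.2) none]
  (PySem.List.pyGet? words (-1)).getD ""   -- words[-1]; words is never empty, so the default is never used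

-- ===== PORT B =====
def format_username_alt (x : String) (y : String) : String :=
  let m := PySem.Str.len y
  let st :=
    (PySem.List.pyRange 0 (PySem.Str.len x) 1).foldl
      (fun (st : Int × List Int) (i : Int) =>
        let ps :=
          if st.2.isEmpty then
            (i - 1,
             (PySem.List.pyRange 0 m 1).filter
               (fun j => PySem.Str.pyGet? y j == PySem.Str.pyGet? x (i - 1)))
          else st
        let k := i - ps.1
        (ps.1, ps.2.filter
          (fun j => decide (j + k < m) && (PySem.Str.pyGet? y (j + k) == PySem.Str.pyGet? x i))))
      (0, PySem.List.pyRange 0 (m + 1) 1)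
  PySem.Str.slice x (some st.1) none

-- ===== PRECONDITION & SPEC =====
def Spec_format_username (x : String) (y : String) (out : String) : Prop := out = format_username_alt x y
instance (x : String) (y : String) (out : String) : Decidable (Spec_format_username x y out) := by unfold Spec_format_username; infer_instance

-- ===== CLAIM (what is proved, stated in full; the proofs are below) =====
def Claim_equal_format_username : Prop := ∀ (x : String) (y : String), Dom_format_username x y → Spec_format_username x y (format_username x y)

-- ===== LEMMAS AND PROOFS =====

-- A's loop step, at the list level, folded over the index only (the words list is dead for the result)
def pvStepA (xs ys : List Char) (p i : Int) : Int :=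
  if PySem.Chars.find ys (PySem.List.slice xs (some p) (some i)) = -1 then i - 1 else p

-- B's loop step, at the list level, split into its reset and extension parts
def pvReset (xs ys : List Char) (i : Int) : List Int :=
  (PySem.List.pyRange 0 ((ys.length : Int)) 1).filter
    (fun j => PySem.List.pyGet? ys j == PySem.List.pyGet? xs (i - 1))

def pvExtend (xs ys : List Char) (i : Int) (ps : Int × List Int) : Int × List Int :=
  (ps.1, ps.2.filter
    (fun j => decide (j + (i - ps.1) < (ys.length : Int)) &&
      (PySem.List.pyGet? ys (j + (i - ps.1)) == PySem.List.pyGet? xs i)))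

def pvStepB (xs ys : List Char) (st : Int × List Int) (i : Int) : Int × List Int :=
  pvExtend xs ys i (if st.2.isEmpty then (i - 1, pvReset xs ys i) else st)

-- the canonical value of B's candidate list: the start positions of the window xs[p:i] in ys
def pvOcc (xs ys : List Char) (p i : Int) : List Int :=
  (PySem.List.pyRange 0 ((ys.length : Int) + 1) 1).filter
    (fun j => PySem.List.slice ys (some j) (some (j + (i - p))) == PySem.List.slice xs (some p) (some i))

theorem pv_infix_iff (t s : List Char) : t <:+: s ↔ ∃ j : ℕ, (s.drop j).take t.length = t := by
  constructor
  · rintro ⟨a, b, rfl⟩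
    exact ⟨a.length, by rw [List.append_assoc, List.drop_left, List.take_left]⟩
  · rintro ⟨j, h⟩
    rw [List.infix_iff_prefix_suffix]
    exact ⟨s.drop j, h ▸ List.take_prefix _ _, List.drop_suffix j s⟩

theorem pv_occ_empty_iff_find (xs ys : List Char) (p i : Int) (hp : 0 ≤ p) (hpi : p ≤ i)
    (hin : i ≤ (xs.length : Int)) :
    (pvOcc xs ys p i = [] ↔
      PySem.Chars.find ys (PySem.List.slice xs (some p) (some i)) = -1) := by
  have hi0 : (0 : Int) ≤ i := le_trans hp hpi
  lift p to ℕ using hp with P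
  lift i to ℕ using hi0 with I
  have hPI : P ≤ I := by exact_mod_cast hpi
  have hIn : I ≤ xs.length := by exact_mod_cast hin
  rw [PySem.Chars.find_eq_neg_one_iff, PySem.List.slice_natCast]
  have hwlen : ((xs.drop P).take (I - P)).length = I - P := by
    simp [List.length_take, List.length_drop]; omega
  rw [iff_not_comm]
  unfold pvOcc
  rw [List.eq_nil_iff_forall_not_mem]
  push Not
  constructor
  · intro hinf
    obtain ⟨j, hj⟩ := (pv_infix_iff _ _).1 hinf
    rw [hwlen] at hj
    by_cases hjm : j ≤ ys.length
    · refine ⟨(j : Int), List.mem_filter.2 ⟨PySem.List.mem_pyRange_one.2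
        ⟨by positivity, by exact_mod_cast Nat.lt_succ_of_le hjm⟩, ?_⟩⟩
      have harg : (j : Int) + ((I : Int) - (P : Int)) = ((j + (I - P) : ℕ) : Int) := by omega
      rw [harg, PySem.List.slice_natCast, beq_iff_eq]
      have e : j + (I - P) - j = I - P := by omega
      rw [e, hj, PySem.List.slice_natCast]
    · -- the window matched past the end of ys: it must be empty, so position 0 matches too
      have hdrop : ys.drop j = [] := List.drop_eq_nil_of_le (by omega)
      rw [hdrop, List.take_nil] at hj
      have hIP : I - P = 0 := by
        have h' := hwlen; rw [← hj] at h'; simpa using h'.symm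
      refine ⟨0, List.mem_filter.2 ⟨PySem.List.mem_pyRange_one.2 ⟨le_refl _, by positivity⟩, ?_⟩⟩
      have hzero : (0 : Int) = ((0 : ℕ) : Int) := rfl
      have hc : (0 : Int) + ((I : Int) - (P : Int)) = ((0 : ℕ) : Int) := by omega
      rw [hc, hzero, PySem.List.slice_natCast, PySem.List.slice_natCast, beq_iff_eq]
      simp [hIP]
  · rintro ⟨j, hj⟩
    obtain ⟨hmem, hcond⟩ := List.mem_filter.1 hj
    obtain ⟨hj0, hjm⟩ := PySem.List.mem_pyRange_one.1 hmem
    lift j to ℕ using hj0 with J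
    have harg : (J : Int) + ((I : Int) - (P : Int)) = ((J + (I - P) : ℕ) : Int) := by omega
    rw [harg, PySem.List.slice_natCast, PySem.List.slice_natCast, beq_iff_eq] at hcond
    have harg2 : J + (I - P) - J = I - P := by omega
    rw [harg2] at hcond
    exact (pv_infix_iff _ _).2 ⟨J, by rw [hwlen]; exact hcond⟩

theorem pv_occ_ext (xs ys : List Char) (p i : Int) (hp : 0 ≤ p) (hpi : p ≤ i)
    (hin : i < (xs.length : Int)) :
    (pvOcc xs ys p i).filter
      (fun j => decide (j + (i - p) < (ys.length : Int)) &&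
        (PySem.List.pyGet? ys (j + (i - p)) == PySem.List.pyGet? xs i))
    = pvOcc xs ys p (i + 1) := by
  unfold pvOcc
  rw [List.filter_filter]
  apply List.filter_congr
  intro j hj
  obtain ⟨hj0, hjm⟩ := PySem.List.mem_pyRange_one.1 hj
  have hi0 : (0 : Int) ≤ i := le_trans hp hpi
  lift p to ℕ using hp with P
  lift i to ℕ using hi0 with I
  lift j to ℕ using hj0 with J
  have hPI : P ≤ I := by exact_mod_cast hpi
  have hIn : I < xs.length := by exact_mod_cast hin
  have harg1 : (J : Int) + ((I : Int) - (P : Int)) = ((J + (I - P) : ℕ) : Int) := by omega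
  have harg2 : (J : Int) + ((I : Int) + 1 - (P : Int)) = ((J + (I - P) + 1 : ℕ) : Int) := by omega
  have harg3 : (I : Int) + 1 = ((I + 1 : ℕ) : Int) := by omega
  rw [harg1, harg2, harg3, PySem.List.pyGet?_natCast, PySem.List.pyGet?_natCast,
    PySem.List.slice_natCast, PySem.List.slice_natCast, PySem.List.slice_natCast,
    PySem.List.slice_natCast]
  have e1 : J + (I - P) - J = I - P := by omega
  have e2 : J + (I - P) + 1 - J = (I - P) + 1 := by omega
  have e3 : I + 1 - P = (I - P) + 1 := by omega
  rw [e1, e2, e3]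
  set L := I - P with hL
  rw [Bool.eq_iff_iff]
  simp only [Bool.and_eq_true, beq_iff_eq, decide_eq_true_eq]
  have hgx : xs[I]? = some xs[I] := List.getElem?_eq_getElem hIn
  have hx : (xs.drop P).take (L + 1) = (xs.drop P).take L ++ [xs[I]] := by
    rw [List.take_add_one, List.getElem?_drop]
    have e : P + L = I := by omega
    rw [e, hgx]; rfl
  have hy : (ys.drop J).take (L + 1) = (ys.drop J).take L ++ (ys[J + L]?).toList := by
    rw [List.take_add_one, List.getElem?_drop]
  have hblen : ((xs.drop P).take L).length = L := by
    simp [List.length_take, List.length_drop]; omega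
  constructor
  · rintro ⟨⟨hlt, hget⟩, heq⟩
    rw [hy, hx, heq, hget, hgx]
    rfl
  · intro h
    rw [hy, hx] at h
    by_cases hlt' : J + L < ys.length
    · have hget : ys[J + L]? = some ys[J + L] := List.getElem?_eq_getElem hlt'
      rw [hget] at h
      have halen : ((ys.drop J).take L).length = L := by
        simp [List.length_take, List.length_drop]; omega
      obtain ⟨h1, h2⟩ := List.append_inj h (by rw [halen, hblen])
      refine ⟨⟨by exact_mod_cast hlt', ?_⟩, h1⟩
      rw [hget, hgx]
      simpa using h2
    · exfalso
      have hget : ys[J + L]? = none := List.getElem?_eq_none (by omega)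
      rw [hget] at h
      have hlen := congrArg List.length h
      simp [List.length_take, List.length_drop, hblen] at hlen
      omega

theorem pv_occ_reset (xs ys : List Char) (i : Int) (h1 : 1 ≤ i) (hin : i ≤ (xs.length : Int)) :
    pvReset xs ys i = pvOcc xs ys (i - 1) i := by
  unfold pvReset pvOcc
  rw [PySem.List.pyRange_one_succ_right (by positivity), List.filter_append]
  lift i to ℕ using (by omega : (0:Int) ≤ i) with I
  have hI1 : 1 ≤ I := by exact_mod_cast h1
  have hIn : I ≤ xs.length := by exact_mod_cast hin
  have hi1 : (I : Int) - 1 = ((I - 1 : ℕ) : Int) := by omega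
  have hxg : xs[I - 1]? = some xs[I - 1] := List.getElem?_eq_getElem (by omega)
  have hxs : PySem.List.slice xs (some ((I : Int) - 1)) (some (I : Int)) = [xs[I - 1]] := by
    rw [hi1, PySem.List.slice_natCast]
    have e : I - (I - 1) = 1 := by omega
    rw [e, List.take_one, List.head?_drop, hxg]; rfl
  have hlast : List.filter
      (fun j => PySem.List.slice ys (some j) (some (j + ((I : Int) - ((I : Int) - 1)))) ==
        PySem.List.slice xs (some ((I : Int) - 1)) (some (I : Int)))
      [(ys.length : Int)] = [] := by
    have harg : (ys.length : Int) + ((I : Int) - ((I : Int) - 1)) = ((ys.length + 1 : ℕ) : Int) := by omega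
    simp only [List.filter_cons, List.filter_nil, harg, PySem.List.slice_natCast, hxs]
    have hdrop : ys.drop ys.length = [] := by simp
    simp [hdrop]
  rw [hlast, List.append_nil]
  apply List.filter_congr
  intro j hj
  obtain ⟨hj0, hjm⟩ := PySem.List.mem_pyRange_one.1 hj
  lift j to ℕ using hj0 with J
  have hJm : J < ys.length := by exact_mod_cast hjm
  have harg : (J : Int) + ((I : Int) - ((I : Int) - 1)) = ((J + 1 : ℕ) : Int) := by omega
  rw [harg, PySem.List.slice_natCast, hxs, hi1, PySem.List.pyGet?_natCast, PySem.List.pyGet?_natCast]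
  have e : J + 1 - J = 1 := by omega
  rw [e, List.take_one, List.head?_drop]
  have hyg : ys[J]? = some ys[J] := List.getElem?_eq_getElem hJm
  rw [hyg, hxg, Bool.eq_iff_iff]
  simp

theorem pv_occ_self_mem (xs ys : List Char) (p : Int) (hp : 0 ≤ p) :
    (0 : Int) ∈ pvOcc xs ys p p := by
  lift p to ℕ using hp with P
  unfold pvOcc
  refine List.mem_filter.2 ⟨PySem.List.mem_pyRange_one.2 ⟨le_refl _, by positivity⟩, ?_⟩
  have hzero : (0 : Int) = ((0 : ℕ) : Int) := rfl
  have hc : (0 : Int) + ((P : Int) - (P : Int)) = ((0 : ℕ) : Int) := by omega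
  rw [hc, hzero, PySem.List.slice_natCast, PySem.List.slice_natCast, beq_iff_eq]
  simp

theorem pv_occ_init (xs ys : List Char) :
    pvOcc xs ys 0 0 = PySem.List.pyRange 0 ((ys.length : Int) + 1) 1 := by
  unfold pvOcc
  rw [List.filter_eq_self]
  intro j hj
  obtain ⟨hj0, _⟩ := PySem.List.mem_pyRange_one.1 hj
  lift j to ℕ using hj0 with J
  have hzero : (0 : Int) = ((0 : ℕ) : Int) := rfl
  have hc : (J : Int) + ((0 : Int) - 0) = ((J : ℕ) : Int) := by omega
  rw [hc, hzero, PySem.List.slice_natCast, PySem.List.slice_natCast, beq_iff_eq]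
  simp

-- the second component of A's fold ignores the words list: it is the index-only fold
theorem pv_snd_fold (x y : String) (l : List (Int × Char)) (ws : List String) (p : Int) :
    (l.foldl
      (fun (st : List String × Int) (pr : Int × Char) =>
        let result := PySem.Str.find y (PySem.Str.slice x (some st.2) (some pr.1))
        if result = -1 then
          (st.1 ++ [PySem.Str.slice x (some st.2) (some (pr.1 - 1))], pr.1 - 1)
        else st)
      (ws, p)).2
    = (l.map (·.1)).foldl
        (fun p i => if PySem.Str.find y (PySem.Str.slice x (some p) (some i)) = -1 then i - 1 else p)
        p := by
  induction l generalizing ws p with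
  | nil => rfl
  | cons hd tl ih =>
    simp only [List.foldl_cons, List.map_cons]
    by_cases h : PySem.Str.find y (PySem.Str.slice x (some p) (some hd.1)) = -1
    · rw [if_pos h, if_pos h]; exact ih _ _
    · rw [if_neg h, if_neg h]; exact ih _ _

-- the main invariant: B's state stays (p, pvOcc p i) and both folds produce the same final p
theorem pv_main (xs ys : List Char) : ∀ (cnt : Nat) (i p : Int) (S : List Int),
    0 ≤ p → p ≤ i → i + (cnt : Int) = (xs.length : Int) → S = pvOcc xs ys p i →
    (PySem.List.pyRange i (xs.length : Int) 1).foldl (pvStepA xs ys) p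
      = ((PySem.List.pyRange i (xs.length : Int) 1).foldl (pvStepB xs ys) (p, S)).1 := by
  intro cnt
  induction cnt with
  | zero =>
    intro i p S _ _ hcnt _
    have hnil : PySem.List.pyRange i (xs.length : Int) 1 = [] := by
      apply List.eq_nil_iff_forall_not_mem.2
      intro a ha
      have := PySem.List.mem_pyRange_one.1 ha
      omega
    rw [hnil]; rfl
  | succ cnt ih =>
    intro i p S hp hpi hcnt hS
    have hin : i < (xs.length : Int) := by omega
    rw [PySem.List.pyRange_one_cons hin]
    simp only [List.foldl_cons]
    have hfind := pv_occ_empty_iff_find xs ys p i hp hpi (le_of_lt hin)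
    by_cases hemp : (p, S).2.isEmpty
    · -- window not in y: both sides reset p to i - 1
      have hSnil : S = [] := List.isEmpty_iff.1 hemp
      have h1i : 1 ≤ i := by
        by_contra hlt
        have hpeq : p = i := by omega
        have h0 : (0 : Int) ∈ pvOcc xs ys p i := by
          rw [← hpeq]; exact pv_occ_self_mem xs ys p hp
        rw [← hS, hSnil] at h0
        simp at h0
      have hfneg : PySem.Chars.find ys (PySem.List.slice xs (some p) (some i)) = -1 :=
        hfind.1 (by rw [← hS, hSnil])
      have hstepA : pvStepA xs ys p i = i - 1 := by rw [pvStepA, if_pos hfneg]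
      have hstepB : pvStepB xs ys (p, S) i = (i - 1, pvOcc xs ys (i - 1) (i + 1)) := by
        rw [pvStepB, if_pos hemp]
        show (i - 1, (pvReset xs ys i).filter _) = _
        rw [pv_occ_reset xs ys i h1i (le_of_lt hin)]
        exact congrArg _ (pv_occ_ext xs ys (i - 1) i (by omega) (by omega) hin)
      rw [hstepA, hstepB]
      exact ih (i + 1) (i - 1) _ (by omega) (by omega) (by omega) rfl
    · -- window still occurs in y: p stays, the candidate list is filtered
      have hSnn : S ≠ [] := fun h => hemp (by rw [h]; rfl)
      have hfpos : ¬ PySem.Chars.find ys (PySem.List.slice xs (some p) (some i)) = -1 := by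
        intro h
        exact hSnn (by rw [hS]; exact hfind.2 h)
      have hstepA : pvStepA xs ys p i = p := by rw [pvStepA, if_neg hfpos]
      have hstepB : pvStepB xs ys (p, S) i = (p, pvOcc xs ys p (i + 1)) := by
        rw [pvStepB, if_neg hemp]
        show (p, S.filter _) = _
        rw [hS]
        exact congrArg _ (pv_occ_ext xs ys p i hp hpi hin)
      rw [hstepA, hstepB]
      exact ih (i + 1) p _ hp (by omega) (by omega) rfl

-- ===== VERDICT (by name: the statement is the Claim_ definition above) =====
theorem format_username_spec : Claim_equal_format_username := by
  intro x y _
  show format_username x y = format_username_alt x y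
  unfold format_username format_username_alt
  simp only [PySem.List.pyGet?_neg_one_append_singleton, Option.getD_some]
  rw [pv_snd_fold, PySem.List.map_fst_enumerate, zero_add]
  have hA : (fun (p i : Int) =>
      if PySem.Str.find y (PySem.Str.slice x (some p) (some i)) = -1 then i - 1 else p)
      = pvStepA x.toList y.toList := by
    funext p i
    rw [pvStepA]
    simp [PySem.Str.find_eq, PySem.Str.toList_slice]
  have hB : (fun (st : Int × List Int) (i : Int) =>
      let ps :=
        if st.2.isEmpty then
          (i - 1,
           (PySem.List.pyRange 0 (PySem.Str.len y) 1).filter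
             (fun j => PySem.Str.pyGet? y j == PySem.Str.pyGet? x (i - 1)))
        else st
      let k := i - ps.1
      (ps.1, ps.2.filter
        (fun j => decide (j + k < PySem.Str.len y) && (PySem.Str.pyGet? y (j + k) == PySem.Str.pyGet? x i))))
      = pvStepB x.toList y.toList := by
    funext st i
    cases hst : st.2.isEmpty <;>
      simp [pvStepB, pvExtend, pvReset, hst, PySem.Str.len_eq, PySem.Str.pyGet?_eq]
  rw [hA, hB, PySem.Str.len_eq, PySem.Str.len_eq]
  rw [pv_main x.toList y.toList x.toList.length 0 0 _ (le_refl _) (le_refl _) (by omega)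
    (pv_occ_init x.toList y.toList).symm]
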